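-- pv_equiv track=rewrite | github.com/alan-jiang-angel/CliqueAI | CliqueAI/clique_algorithms/cython/cubis.py | build_CUBIS_nodes
-- ===== SOURCE A (Python) =====
-- def build_CUBIS_nodes(n, adj, core, c_val):
--     nodes = set()
--     for v in range(n):
--         if core.get(v, -1) == c_val:
--             nodes.add(v)
--             b = adj[v]
--             while b:
--                 lsb = b & -b
--                 u = lsb.bit_length() - 1
--                 b &= b - 1
--                 if core.get(u, -1) > c_val:
--                     nodes.add(u)
--     return nodes
-- ===== SOURCE B (Python) =====
-- def build_CUBIS_nodes(n, adj, core, c_val):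
--     # Stage 1: the base vertices of core value exactly c_val.
--     base = [v for v in range(n) if core.get(v, -1) == c_val]
--     # Stage 2: width of the widest relevant adjacency mask.
--     width = 0
--     for v in base:
--         width = max(width, adj[v].bit_length())
--     # Stage 3: precomputed ascending list of all candidate higher-core vertices.
--     hi = [u for u in range(width) if core.get(u, -1) > c_val]
--     # Stage 4: for each base vertex, membership-test each candidate in its mask
--     # (no bit enumeration at all).
--     nodes = set()
--     for v in base:
--         nodes.add(v)
--         m = adj[v]
--         for u in hi:
--             if (m >> u) & 1:
--                 nodes.add(u)
--     return nodes
-- ===== Notes on version B (the rewrite author's own statement) =====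
-- stated objective: alternative
-- what changed: B replaces A's per-vertex set-bit enumeration (b & -b / bit_length inner while-loop) by staged passes: it first collects the base-vertex list, computes the maximum bit-length of their masks, precomputes one ascending candidate list of all higher-core vertices below that width, and then membership-tests each candidate in each base vertex's mask, so no bit-popping loop remains.
import Mathlib
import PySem

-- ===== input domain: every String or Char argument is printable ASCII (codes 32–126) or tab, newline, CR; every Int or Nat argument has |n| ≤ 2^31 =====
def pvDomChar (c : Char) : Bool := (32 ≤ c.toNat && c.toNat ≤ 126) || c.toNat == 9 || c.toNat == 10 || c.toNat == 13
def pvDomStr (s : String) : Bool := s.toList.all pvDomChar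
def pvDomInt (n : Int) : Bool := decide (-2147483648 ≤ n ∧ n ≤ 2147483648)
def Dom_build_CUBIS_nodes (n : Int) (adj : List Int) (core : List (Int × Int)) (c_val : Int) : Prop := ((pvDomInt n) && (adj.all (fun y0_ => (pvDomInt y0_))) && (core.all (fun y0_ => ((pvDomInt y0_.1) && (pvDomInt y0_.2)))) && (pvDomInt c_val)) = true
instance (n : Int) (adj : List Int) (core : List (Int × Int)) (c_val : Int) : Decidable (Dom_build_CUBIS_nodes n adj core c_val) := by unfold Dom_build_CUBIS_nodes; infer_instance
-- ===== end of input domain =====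

-- B replaces A's per-vertex set-bit enumeration (b & -b / bit_length) by staged passes: it
-- precomputes the base-vertex list and one ascending candidate list of higher-core vertices
-- (bounded by the widest relevant mask), then membership-tests each candidate in each mask;
-- objective: alternative decomposition, same asymptotic cost on these bounded masks.

-- ===== PORT A =====
-- A's inner 'while b:' loop; it runs on b.toNat, exact for 0 ≤ b (Pre_ guarantees this;
-- Python diverges on a negative mask).
def pvWhileA (core : List (Int × Int)) (c_val : Int) (nodes : PySem.Set Int) (b : Nat) : PySem.Set Int :=
  if _hb : b = 0 then nodes
  else
    let lsb : Int := PySem.Int.band (b : Int) (-(b : Int))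
    let u : Int := (PySem.Int.bitLength lsb : Int) - 1
    let b' := b &&& (b - 1)
    pvWhileA core c_val (if PySem.Dict.getD ⟨core⟩ u (-1) > c_val then PySem.Set.add nodes u else nodes) b'
termination_by b
decreasing_by exact Nat.lt_of_le_of_lt Nat.and_le_right (by omega)

def build_CUBIS_nodes (n : Int) (adj : List Int) (core : List (Int × Int)) (c_val : Int) : List Int :=
  (PySem.List.pyRange 0 n 1).foldl (fun nodes v =>
    if PySem.Dict.getD ⟨core⟩ v (-1) = c_val then
      match PySem.List.pyGet? adj v with
      | some b => pvWhileA core c_val (PySem.Set.add nodes v) b.toNat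
      | none => PySem.Set.add nodes v   -- Python raises IndexError here; outside Pre_
    else nodes) []

-- ===== PORT B =====
def build_CUBIS_nodes_alt (n : Int) (adj : List Int) (core : List (Int × Int)) (c_val : Int) : List Int :=
  -- Stage 1: base vertices
  let base := (PySem.List.pyRange 0 n 1).filter (fun v => PySem.Dict.getD ⟨core⟩ v (-1) == c_val)
  -- Stage 2: width of the widest relevant mask ('width = max(width, adj[v].bit_length())';
  -- adj[v]: Python raises IndexError out of range (outside Pre_); getD 0 there)
  let width : Int := base.foldl (fun w v => max w ((PySem.Int.bitLength ((PySem.List.pyGet? adj v).getD 0) : Int))) 0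
  -- Stage 3: candidate higher-core vertices
  let hi := (PySem.List.pyRange 0 width 1).filter (fun u => decide (PySem.Dict.getD ⟨core⟩ u (-1) > c_val))
  -- Stage 4: membership-test each candidate in each base vertex's mask
  base.foldl (fun nodes v =>
    let m := (PySem.List.pyGet? adj v).getD 0
    hi.foldl (fun nodes u =>
      if PySem.Int.band (m >>> u.toNat) 1 = 1 then PySem.Set.add nodes u else nodes)
      (PySem.Set.add nodes v)) []

-- ===== PRECONDITION & SPEC =====
-- Pre_ excludes exactly the inputs where Python A does not return: a selected vertex v
-- (core.get(v,-1)==c_val, 0 ≤ v < n) that indexes adj out of range (IndexError) or whose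
-- mask adj[v] is negative (the bit-clearing while loop never terminates). It is stated in
-- a bounded form (scanning adj's indices and core's entries, never all of range(n)) so it
-- decides cheaply even for huge n; the `n ≤ …` bound in the last conjunct is forced
-- (beyond adj every vertex of range(n) would have to be a distinct core key, else some
-- selected v indexes adj out of range).
def Pre_build_CUBIS_nodes (n : Int) (adj : List Int) (core : List (Int × Int)) (c_val : Int) : Prop :=
  (∀ v ∈ PySem.List.pyRange 0 (min n (adj.length : Int)) 1,
      PySem.Dict.getD ⟨core⟩ v (-1) = c_val → 0 ≤ PySem.List.pyGetD adj v 0) ∧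
  (∀ p ∈ core, (adj.length : Int) ≤ p.1 → p.1 < n →
      PySem.Dict.getD ⟨core⟩ p.1 (-1) ≠ c_val) ∧
  (c_val = -1 → (adj.length : Int) < n →
      n ≤ (adj.length : Int) + core.length + 1 ∧
      ∀ v ∈ PySem.List.pyRange (adj.length : Int) n 1,
        PySem.Dict.getD ⟨core⟩ v (-1) ≠ c_val)
instance (n : Int) (adj : List Int) (core : List (Int × Int)) (c_val : Int) : Decidable (Pre_build_CUBIS_nodes n adj core c_val) := by unfold Pre_build_CUBIS_nodes; infer_instance

def pvWitness_build_CUBIS_nodes : Int × List Int × (List (Int × Int)) × Int :=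
  (9, [4], [(0, 0), (5, 1), (7, 2)], 0)

def Spec_build_CUBIS_nodes (n : Int) (adj : List Int) (core : List (Int × Int)) (c_val : Int) (out : List Int) : Prop := out = build_CUBIS_nodes_alt n adj core c_val
instance (n : Int) (adj : List Int) (core : List (Int × Int)) (c_val : Int) (out : List Int) : Decidable (Spec_build_CUBIS_nodes n adj core c_val out) := by unfold Spec_build_CUBIS_nodes; infer_instance

-- ===== CLAIM (what is proved, stated in full; the proofs are below) =====
def Claim_equal_build_CUBIS_nodes : Prop := ∀ (n : Int) (adj : List Int) (core : List (Int × Int)) (c_val : Int), Dom_build_CUBIS_nodes n adj core c_val → Pre_build_CUBIS_nodes n adj core c_val → Spec_build_CUBIS_nodes n adj core c_val (build_CUBIS_nodes n adj core c_val)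

-- ===== LEMMAS AND PROOFS =====

-- proof-only helpers: the list of set-bit positions of a mask, in A's (lsb-clearing) and
-- in shift-and-test enumeration order
def pvPosL (b : Nat) : List Int :=
  if _hb : b = 0 then []
  else ((PySem.Int.bitLength (PySem.Int.band (b : Int) (-(b : Int))) : Int) - 1) :: pvPosL (b &&& (b - 1))
termination_by b
decreasing_by exact Nat.lt_of_le_of_lt Nat.and_le_right (by omega)

def pvPosS (b : Nat) (off : Int) : List Int :=
  if _hb : b = 0 then []
  else (if b &&& 1 = 1 then [off] else []) ++ pvPosS (b >>> 1) (off + 1)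
termination_by b
decreasing_by rw [Nat.shiftRight_one]; omega

def pvStep (core : List (Int × Int)) (c_val : Int) (s : PySem.Set Int) (u : Int) : PySem.Set Int :=
  if PySem.Dict.getD ⟨core⟩ u (-1) > c_val then PySem.Set.add s u else s

theorem pv_lsb_eq (b : Nat) :
    PySem.Int.band (b : Int) (-(b : Int)) = ((b - (b &&& (b - 1)) : Nat) : Int) := by
  cases b with
  | zero => decide
  | succ m =>
    unfold PySem.Int.band
    rw [if_pos (by positivity), if_neg (by omega)]
    have h1 : (((m + 1 : Nat) : Int)).toNat = m + 1 := by omega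
    have h2 : (-(-((m + 1 : Nat) : Int)) - 1).toNat = m := by omega
    rw [h1, h2]
    simp

theorem pvN1 (k : Nat) : (2 * k + 1) &&& (2 * k) = 2 * k := by
  apply Nat.eq_of_testBit_eq
  intro i
  cases i with
  | zero =>
    rw [Nat.testBit_and]
    simp only [Nat.testBit_zero]
    have h : 2 * k % 2 = 0 := by omega
    simp [h]
  | succ i =>
    rw [Nat.testBit_and]
    simp only [Nat.testBit_add_one]
    have h1 : (2 * k + 1) / 2 = k := by omega
    have h2 : 2 * k / 2 = k := by omega
    rw [h1, h2, Bool.and_self]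

theorem pvN2 (c : Nat) (hc : 0 < c) : (2 * c) &&& (2 * c - 1) = 2 * (c &&& (c - 1)) := by
  apply Nat.eq_of_testBit_eq
  intro i
  cases i with
  | zero =>
    rw [Nat.testBit_and]
    simp only [Nat.testBit_zero]
    have h : 2 * c % 2 = 0 := by omega
    have h' : 2 * (c &&& (c - 1)) % 2 = 0 := by omega
    simp [h, h']
  | succ i =>
    rw [Nat.testBit_and]
    simp only [Nat.testBit_add_one]
    have h1 : 2 * c / 2 = c := by omega
    have h2 : (2 * c - 1) / 2 = c - 1 := by omega
    have h3 : 2 * (c &&& (c - 1)) / 2 = c &&& (c - 1) := by omega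
    rw [h1, h2, h3, Nat.testBit_and]

theorem pv_bitLength_two_mul (x : Nat) (hx : 0 < x) :
    PySem.Int.bitLength ((2 * x : Nat) : Int) = PySem.Int.bitLength ((x : Nat) : Int) + 1 := by
  rw [PySem.Int.bitLength_of_pos (by positivity)]
  have h := PySem.Int.floordiv_natCast (2 * x) 2
  have h2 : ((2 : Nat) : Int) = (2 : Int) := by norm_num
  rw [h2] at h
  rw [h]
  congr 2
  omega

theorem pv_head_two_mul (c : Nat) (hc : 0 < c) :
    (PySem.Int.bitLength (PySem.Int.band ((2 * c : Nat) : Int) (-((2 * c : Nat) : Int))) : Int) - 1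
      = ((PySem.Int.bitLength (PySem.Int.band (c : Int) (-(c : Int))) : Int) - 1) + 1 := by
  rw [pv_lsb_eq, pv_lsb_eq, pvN2 c hc]
  have hlt : c &&& (c - 1) < c := Nat.lt_of_le_of_lt Nat.and_le_right (by omega)
  have he : 2 * c - 2 * (c &&& (c - 1)) = 2 * (c - (c &&& (c - 1))) := by omega
  rw [he, pv_bitLength_two_mul _ (by omega)]
  push_cast
  ring

theorem pvPosL_two_mul (c : Nat) : pvPosL (2 * c) = (pvPosL c).map (· + 1) := by
  induction c using Nat.strong_induction_on with
  | _ c ih =>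
    rcases Nat.eq_zero_or_pos c with hc | hc
    · subst hc
      simp only [Nat.mul_zero]
      rw [pvPosL]
      simp
    · have hlt : c &&& (c - 1) < c := Nat.lt_of_le_of_lt Nat.and_le_right (by omega)
      conv_lhs => rw [pvPosL]
      conv_rhs => rw [pvPosL]
      rw [dif_neg (by omega : ¬ 2 * c = 0), dif_neg (by omega : ¬ c = 0),
        pvN2 c hc, ih _ hlt, pv_head_two_mul c hc, List.map_cons]

theorem pvPosS_eq_map (b : Nat) (off : Int) : pvPosS b off = (pvPosL b).map (· + off) := by
  induction b using Nat.strong_induction_on generalizing off with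
  | _ b ih =>
    rcases Nat.eq_zero_or_pos b with hb | hb
    · subst hb
      rw [pvPosS, pvPosL]
      simp
    · rw [pvPosS, dif_neg (by omega : ¬ b = 0), Nat.shiftRight_one]
      have hand : b &&& 1 = b % 2 := Nat.and_one_is_mod b
      by_cases hpar : b &&& 1 = 1
      · -- b odd
        have hmod : b % 2 = 1 := by omega
        have hb1 : b &&& (b - 1) = b - 1 := by
          have h2 : b = 2 * (b / 2) + 1 := by omega
          have h3 : b - 1 = 2 * (b / 2) := by omega
          rw [show b &&& (b - 1) = (2 * (b / 2) + 1) &&& (2 * (b / 2)) by rw [← h2, ← h3],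
            pvN1, ← h3]
        have hhead : (PySem.Int.bitLength (PySem.Int.band (b : Int) (-(b : Int))) : Int) - 1 = 0 := by
          rw [pv_lsb_eq, hb1, show b - (b - 1) = 1 by omega]
          norm_num [show PySem.Int.bitLength (1 : Int) = 1 by decide]
        have htail : pvPosL (b - 1) = (pvPosL (b / 2)).map (· + 1) := by
          rw [show b - 1 = 2 * (b / 2) by omega, pvPosL_two_mul]
        rw [if_pos hpar, ih (b / 2) (by omega) (off + 1)]
        conv_rhs => rw [pvPosL]
        rw [dif_neg (by omega : ¬ b = 0), hhead, hb1, htail, List.map_cons, List.map_map]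
        simp only [List.singleton_append, zero_add, Function.comp_def]
        exact congrArg (List.cons off) (List.map_congr_left fun x _ => by ring)
      · -- b even
        have hmod : b % 2 = 0 := by omega
        rw [if_neg hpar, ih (b / 2) (by omega) (off + 1)]
        conv_rhs => rw [show b = 2 * (b / 2) by omega, pvPosL_two_mul, List.map_map]
        simp only [List.nil_append, Function.comp_def]
        exact List.map_congr_left fun x _ => by ring

theorem pvWhileA_eq_foldl (core : List (Int × Int)) (c_val : Int) (b : Nat) (s : PySem.Set Int) :
    pvWhileA core c_val s b = (pvPosL b).foldl (pvStep core c_val) s := by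
  induction b using Nat.strong_induction_on generalizing s with
  | _ b ih =>
    rcases Nat.eq_zero_or_pos b with hb | hb
    · subst hb; rw [pvWhileA, pvPosL]; simp
    · have hlt : b &&& (b - 1) < b := Nat.lt_of_le_of_lt Nat.and_le_right (by omega)
      rw [pvWhileA, pvPosL, dif_neg (by omega : ¬ b = 0), dif_neg (by omega : ¬ b = 0),
        List.foldl_cons, ih _ hlt]
      rfl

-- shift-and-test enumeration = the ascending filter of range W, for any W wide enough
theorem pvPosS_eq_filter_range (W : Nat) (b : Nat) (off : Int) (h : b < 2 ^ W) :
    pvPosS b off = ((List.range W).filter (fun u => b.testBit u)).map (fun (u : Nat) => ((u : Int) + off)) := by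
  induction W generalizing b off with
  | zero =>
    interval_cases b
    rw [pvPosS]
    simp
  | succ W ih =>
    rcases Nat.eq_zero_or_pos b with hb | hb
    · subst hb
      rw [pvPosS]
      simp
    · rw [pvPosS, dif_neg (by omega : ¬ b = 0), List.range_succ_eq_map, List.filter_cons,
        List.filter_map, ih (b >>> 1) (off + 1) (by rw [Nat.shiftRight_one]; omega)]
      have hbit0 : b.testBit 0 = decide (b &&& 1 = 1) := by
        simp [Nat.testBit, Nat.one_and_eq_mod_two, Nat.and_one_is_mod]
        by_cases hp : b % 2 = 1 <;> simp [hp]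
      have hcomp : (fun u => b.testBit u) ∘ Nat.succ = (fun u => (b >>> 1).testBit u) := by
        funext u
        simp [Nat.testBit, Nat.shiftRight_succ_inside]
      rw [hcomp]
      by_cases hpar : b &&& 1 = 1
      · rw [if_pos hpar]
        have h0 : b.testBit 0 = true := by rw [hbit0]; simp [hpar]
        simp only [h0, if_true, List.map_cons, List.map_map, Nat.cast_zero, zero_add,
          List.singleton_append]
        refine congrArg (List.cons off) (List.map_congr_left fun x _ => ?_)
        simp only [Function.comp_apply, Nat.succ_eq_add_one]
        push_cast
        ring
      · rw [if_neg hpar]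
        have h0 : b.testBit 0 = false := by
          rw [hbit0]
          simp only [decide_eq_false_iff_not]
          exact hpar
        simp only [h0, Bool.false_eq_true, if_false, List.map_map, List.nil_append]
        refine List.map_congr_left fun x _ => ?_
        simp only [Function.comp_apply, Nat.succ_eq_add_one]
        push_cast
        ring

theorem pv_band_shift_testBit (b k : Nat) :
    (PySem.Int.band ((b : Int) >>> k) 1 = 1) ↔ b.testBit k := by
  rw [show ((b : Int) >>> k) = ((b >>> k : Nat) : Int) from rfl,
    show (1 : Int) = ((1 : Nat) : Int) from rfl, PySem.Int.band_natCast, Nat.and_one_is_mod]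
  rw [show (↑(b >>> k % 2) = ((1 : Nat) : Int)) ↔ (b >>> k % 2 = 1) from Nat.cast_inj]
  simp [Nat.testBit, Nat.one_and_eq_mod_two]

-- B's candidate-scan inner loop = A's while loop, for any wide-enough W
theorem pv_inner (core : List (Int × Int)) (c_val : Int) (W : Nat) (b : Nat)
    (hW : b < 2 ^ W) (s : PySem.Set Int) :
    ((PySem.List.pyRange 0 (W : Int) 1).filter
        (fun u => decide (PySem.Dict.getD ⟨core⟩ u (-1) > c_val))).foldl
      (fun nodes u =>
        if PySem.Int.band ((b : Int) >>> u.toNat) 1 = 1 then PySem.Set.add nodes u else nodes) s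
    = pvWhileA core c_val s b := by
  rw [pvWhileA_eq_foldl]
  have hP : pvPosL b = pvPosS b 0 := by
    rw [pvPosS_eq_map]
    simp
  rw [hP, pvPosS_eq_filter_range W b 0 hW, PySem.List.pyRange_zero_natCast,
    List.filter_map, List.foldl_map, List.foldl_filter, List.foldl_map, List.foldl_filter]
  apply PySem.List.foldl_congr_mem
  intro acc u _
  simp only [Function.comp_def, Int.toNat_natCast, add_zero]
  by_cases h1 : PySem.Dict.getD (⟨core⟩ : PySem.Dict Int Int) (u : Int) (-1) > c_val <;>
    by_cases h2 : b.testBit u <;>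
      simp [h1, h2, pvStep, pv_band_shift_testBit]

-- Pre_ (bounded form) yields, for every selected v of range(n), the in-range and
-- nonnegative-mask facts the main proof needs.
theorem pv_pre_elim (n : Int) (adj : List Int) (core : List (Int × Int)) (c_val : Int)
    (hpre : Pre_build_CUBIS_nodes n adj core c_val) (v : Int)
    (hv : v ∈ PySem.List.pyRange 0 n 1)
    (hc : PySem.Dict.getD ⟨core⟩ v (-1) = c_val) :
    PySem.Raise.InRange adj.length v ∧ 0 ≤ PySem.List.pyGetD adj v 0 := by
  obtain ⟨h1, h2, h3⟩ := hpre
  rw [PySem.List.mem_pyRange_one] at hv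
  by_cases hla : v < (adj.length : Int)
  · refine ⟨⟨by omega, by omega⟩, h1 v (PySem.List.mem_pyRange_one.mpr ⟨hv.1, by omega⟩) hc⟩
  · exfalso
    by_cases hkey : ∃ p ∈ core, p.1 = v
    · obtain ⟨p, hp, hpv⟩ := hkey
      exact h2 p hp (by omega) (by omega) (hpv ▸ hc)
    · have hget : PySem.Dict.get? (⟨core⟩ : PySem.Dict Int Int) v = none := by
        rw [PySem.Dict.get?_eq_none_iff_not_mem_keys]
        simp only [PySem.Dict.keys, List.mem_map]
        rintro ⟨p, hp, hpv⟩
        exact hkey ⟨p, hp, hpv⟩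
      have hneg : PySem.Dict.getD (⟨core⟩ : PySem.Dict Int Int) v (-1) = -1 := by
        simp [PySem.Dict.getD, hget]
      have hcv : c_val = -1 := by rw [← hc, hneg]
      obtain ⟨-, h4⟩ := h3 hcv (by omega)
      exact h4 v (PySem.List.mem_pyRange_one.mpr ⟨by omega, hv.2⟩) hc

-- ===== VERDICT (by name: the statement is the Claim_ definition above) =====
theorem build_CUBIS_nodes_spec : Claim_equal_build_CUBIS_nodes := by
  intro n adj core c_val _ hpre
  unfold Spec_build_CUBIS_nodes build_CUBIS_nodes build_CUBIS_nodes_alt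
  simp only []
  set base := (PySem.List.pyRange 0 n 1).filter
    (fun v => PySem.Dict.getD ⟨core⟩ v (-1) == c_val) with hbase
  set width : Int := base.foldl
    (fun w v => max w ((PySem.Int.bitLength ((PySem.List.pyGet? adj v).getD 0) : Int))) 0 with hwidth
  have hw0 : 0 ≤ width := by
    rw [hwidth]
    exact (PySem.List.le_foldl_max_int base
      (fun v => ((PySem.Int.bitLength ((PySem.List.pyGet? adj v).getD 0) : Int))) 0).1
  have hwid : width = ((width.toNat : Nat) : Int) := by omega
  rw [hbase, List.foldl_filter]
  apply PySem.List.foldl_congr_mem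
  intro s v hv
  by_cases hc : PySem.Dict.getD ⟨core⟩ v (-1) = c_val
  · obtain ⟨hin, hnn⟩ := pv_pre_elim n adj core c_val hpre v hv hc
    obtain ⟨b, hb⟩ : ∃ b, PySem.List.pyGet? adj v = some b := by
      cases h : PySem.List.pyGet? adj v with
      | none => exact absurd ((PySem.List.pyGet?_eq_none_iff adj v).mp h) (not_not_intro hin)
      | some b => exact ⟨b, rfl⟩
    have hbnn : 0 ≤ b := by
      have : PySem.List.pyGetD adj v 0 = b := by simp [PySem.List.pyGetD, hb]
      omega
    have hvbase : v ∈ base := by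
      rw [hbase, List.mem_filter]
      exact ⟨hv, by simp [hc]⟩
    have hble : (PySem.Int.bitLength b : Int) ≤ width := by
      have h := (PySem.List.le_foldl_max_int base
        (fun v => ((PySem.Int.bitLength ((PySem.List.pyGet? adj v).getD 0) : Int))) 0).2 v hvbase
      rw [← hwidth] at h
      simpa [hb] using h
    have hblt : b.toNat < 2 ^ width.toNat := by
      have h1 : b.natAbs < 2 ^ PySem.Int.bitLength b := PySem.Int.lt_two_pow_bitLength b
      have h2 : PySem.Int.bitLength b ≤ width.toNat := by omega
      calc b.toNat = b.natAbs := by omega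
        _ < 2 ^ PySem.Int.bitLength b := h1
        _ ≤ 2 ^ width.toNat := Nat.pow_le_pow_right (by omega) h2
    simp only [hc, if_pos, beq_self_eq_true, hb, Option.getD_some]
    conv_rhs => rw [hwid, show b = ((b.toNat : Nat) : Int) by omega]
    exact (pv_inner core c_val width.toNat b.toNat hblt (PySem.Set.add s v)).symm
  · simp [hc]
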